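-- pv_equiv track=rewrite | github.com/TejasaVi/miscellaneous | python/market_scraper/participant_data.py | get_sentiment_segment_wise
-- ===== SOURCE A (Python) =====
-- def get_sentiment_segment_wise(data, ttype):
--     negative_list = []
--     positive_list = []
--     neutral_list = []
--     for item in data:
--         if data[item][ttype]['sentiment'] == "Negative":
--             negative_list.append(item)
--         elif data[item][ttype]['sentiment'] == "Positive":
--             positive_list.append(item)
--         elif data[item][ttype]['sentiment'] == "Neutral":
--             neutral_list.append(item)
--     return (negative_list,positive_list,neutral_list)
-- ===== SOURCE B (Python) =====
-- def get_sentiment_segment_wise(data, ttype):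
--     def pick(label):
--         return [item for item in data if data[item][ttype]['sentiment'] == label]
--     return (pick("Negative"), pick("Positive"), pick("Neutral"))
-- ===== Notes on version B (the rewrite author's own statement) =====
-- stated objective: simpler
-- what changed: Replaces A's single pass with an if/elif chain over three mutable accumulator lists by three independent filter passes (one list comprehension per sentiment label), one per returned list.
import Mathlib
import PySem

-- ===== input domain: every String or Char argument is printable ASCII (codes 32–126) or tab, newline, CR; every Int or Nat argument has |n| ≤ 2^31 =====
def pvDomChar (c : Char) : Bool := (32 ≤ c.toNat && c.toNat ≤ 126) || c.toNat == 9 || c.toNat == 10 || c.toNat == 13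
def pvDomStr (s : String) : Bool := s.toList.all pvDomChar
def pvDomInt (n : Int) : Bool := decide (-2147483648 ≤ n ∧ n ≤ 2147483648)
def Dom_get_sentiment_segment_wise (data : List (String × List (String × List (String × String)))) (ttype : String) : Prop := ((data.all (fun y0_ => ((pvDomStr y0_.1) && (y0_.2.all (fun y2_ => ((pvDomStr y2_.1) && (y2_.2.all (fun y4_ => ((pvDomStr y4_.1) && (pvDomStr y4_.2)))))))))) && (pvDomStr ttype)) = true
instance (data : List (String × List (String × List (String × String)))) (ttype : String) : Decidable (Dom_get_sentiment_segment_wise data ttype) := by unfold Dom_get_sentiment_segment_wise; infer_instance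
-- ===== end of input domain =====

-- B replaces A's single pass with an if/elif chain over three accumulator lists by three
-- independent filter passes, one list comprehension per sentiment label; same cost, simpler.


-- shared helper: the expression data[item][ttype]['sentiment'] (both Pythons contain it
-- verbatim); the getD defaults are never reached under Pre_ (all keys are present there)
def pvSentLookup (data : List (String × List (String × List (String × String)))) (ttype item : String) : String :=
  let entry := ((PySem.Dict.mk data).get? item).getD []
  let trec := ((PySem.Dict.mk entry).get? ttype).getD []
  ((PySem.Dict.mk trec).get? "sentiment").getD ""

-- ===== PORT A =====
-- for item in data: one pass, if/elif chain appending to three accumulator lists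
def get_sentiment_segment_wise (data : List (String × List (String × List (String × String)))) (ttype : String) : List String × List String × List String :=
  (data.map (·.1)).foldl
    (fun acc item =>
      let s := pvSentLookup data ttype item
      if s = "Negative" then (acc.1 ++ [item], acc.2.1, acc.2.2)
      else if s = "Positive" then (acc.1, acc.2.1 ++ [item], acc.2.2)
      else if s = "Neutral" then (acc.1, acc.2.1, acc.2.2 ++ [item])
      else acc)
    ([], [], [])

-- ===== PORT B =====
-- pick(label) = [item for item in data if data[item][ttype]['sentiment'] == label]
def pvPick (data : List (String × List (String × List (String × String)))) (ttype label : String) : List String :=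
  (data.map (·.1)).filter (fun item => pvSentLookup data ttype item == label)

def get_sentiment_segment_wise_alt (data : List (String × List (String × List (String × String)))) (ttype : String) : List String × List String × List String :=
  (pvPick data ttype "Negative", pvPick data ttype "Positive", pvPick data ttype "Neutral")

-- ===== PRECONDITION & SPEC =====
-- Pre_ excludes inputs where some row lacks the ttype key or its ttype row lacks the
-- 'sentiment' key (both Pythons raise KeyError there), and association lists with duplicate
-- keys at some level, which do not faithfully represent a Python dict input.
def Pre_get_sentiment_segment_wise (data : List (String × List (String × List (String × String)))) (ttype : String) : Prop :=
  (data.map (·.1)).Nodup ∧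
  ∀ p ∈ data, (p.2.map (·.1)).Nodup ∧
    ∃ q ∈ p.2, q.1 = ttype ∧ (q.2.map (·.1)).Nodup ∧ ∃ r ∈ q.2, r.1 = "sentiment"
instance (data : List (String × List (String × List (String × String)))) (ttype : String) : Decidable (Pre_get_sentiment_segment_wise data ttype) := by unfold Pre_get_sentiment_segment_wise; infer_instance

def pvWitness_get_sentiment_segment_wise : (List (String × List (String × List (String × String)))) × String :=
  ([("a", [("t", [("sentiment", "Positive")])]), ("b", [("t", [("sentiment", "Negative")])])], "t")

def Spec_get_sentiment_segment_wise (data : List (String × List (String × List (String × String)))) (ttype : String) (out : List String × List String × List String) : Prop := out = get_sentiment_segment_wise_alt data ttype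
instance (data : List (String × List (String × List (String × String)))) (ttype : String) (out : List String × List String × List String) : Decidable (Spec_get_sentiment_segment_wise data ttype out) := by unfold Spec_get_sentiment_segment_wise; infer_instance

-- ===== CLAIM (what is proved, stated in full; the proofs are below) =====
def Claim_equal_get_sentiment_segment_wise : Prop := ∀ (data : List (String × List (String × List (String × String)))) (ttype : String), Dom_get_sentiment_segment_wise data ttype → Pre_get_sentiment_segment_wise data ttype → Spec_get_sentiment_segment_wise data ttype (get_sentiment_segment_wise data ttype)

-- ===== LEMMAS AND PROOFS =====

-- A's fold accumulates exactly the three filters of the key list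
theorem pvA_accum (data : List (String × List (String × List (String × String)))) (ttype : String)
    (keys : List String) (acc : List String × List String × List String) :
    keys.foldl
      (fun acc item =>
        let s := pvSentLookup data ttype item
        if s = "Negative" then (acc.1 ++ [item], acc.2.1, acc.2.2)
        else if s = "Positive" then (acc.1, acc.2.1 ++ [item], acc.2.2)
        else if s = "Neutral" then (acc.1, acc.2.1, acc.2.2 ++ [item])
        else acc) acc =
      (acc.1 ++ keys.filter (fun item => pvSentLookup data ttype item == "Negative"),
       acc.2.1 ++ keys.filter (fun item => pvSentLookup data ttype item == "Positive"),
       acc.2.2 ++ keys.filter (fun item => pvSentLookup data ttype item == "Neutral")) := by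
  induction keys generalizing acc with
  | nil => simp
  | cons k l ih =>
    simp only [List.foldl_cons, ih, List.filter_cons]
    by_cases h1 : pvSentLookup data ttype k = "Negative"
    · simp [h1]
    · by_cases h2 : pvSentLookup data ttype k = "Positive"
      · simp [h2]
      · by_cases h3 : pvSentLookup data ttype k = "Neutral"
        · simp [h3]
        · simp [h1, h2, h3]

-- ===== VERDICT (by name: the statement is the Claim_ definition above) =====
theorem get_sentiment_segment_wise_spec : Claim_equal_get_sentiment_segment_wise := by
  intro data ttype _ _
  unfold Spec_get_sentiment_segment_wise get_sentiment_segment_wise get_sentiment_segment_wise_alt pvPick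
  rw [pvA_accum]
  simp
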